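-- pv_equiv track=rewrite | github.com/OoDBag/VisTA | vista/src/r1-v/relax_test.py | clean_answer_for_number_comparison
-- ===== SOURCE A (Python) =====
-- def clean_answer_for_number_comparison(label, answer):
--
--     if answer is None:
--         return answer
--
--
--     if str(label).replace(".", "").isdigit():
--
--         if ":" in str(answer):
--             return answer
--         temp_answer = ''.join(char for char in str(answer) if char.isdigit() or char == '.')
--
--
--         result = []
--         i = 0
--         while i < len(temp_answer):
--             if temp_answer[i] == '.':
--
--                 if i == len(temp_answer) - 1 or not temp_answer[i + 1].isdigit():
--                     i += 1
--                     continue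
--             result.append(temp_answer[i])
--             i += 1
--
--         cleaned_answer = ''.join(result).strip()
--         return cleaned_answer
--     return answer
-- ===== SOURCE B (Python) =====
-- def clean_answer_for_number_comparison(label, answer):
--     if answer is None:
--         return answer
--     if str(label).replace(".", "").isdigit():
--         if ":" in str(answer):
--             return answer
--         result = []
--         pending_dot = False
--         for char in str(answer):
--             if char.isdigit():
--                 if pending_dot:
--                     result.append('.')
--                     pending_dot = False
--                 result.append(char)
--             elif char == '.':
--                 pending_dot = True
--         return ''.join(result).strip()
--     return answer
-- ===== Notes on version B (the rewrite author's own statement) =====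
-- stated objective: simpler
-- what changed: Replaces A's two-stage filter-then-index-lookahead dot removal with a single pass over the answer maintaining a pending_dot flag, emitting a dot only when a digit follows it.
import Mathlib
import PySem

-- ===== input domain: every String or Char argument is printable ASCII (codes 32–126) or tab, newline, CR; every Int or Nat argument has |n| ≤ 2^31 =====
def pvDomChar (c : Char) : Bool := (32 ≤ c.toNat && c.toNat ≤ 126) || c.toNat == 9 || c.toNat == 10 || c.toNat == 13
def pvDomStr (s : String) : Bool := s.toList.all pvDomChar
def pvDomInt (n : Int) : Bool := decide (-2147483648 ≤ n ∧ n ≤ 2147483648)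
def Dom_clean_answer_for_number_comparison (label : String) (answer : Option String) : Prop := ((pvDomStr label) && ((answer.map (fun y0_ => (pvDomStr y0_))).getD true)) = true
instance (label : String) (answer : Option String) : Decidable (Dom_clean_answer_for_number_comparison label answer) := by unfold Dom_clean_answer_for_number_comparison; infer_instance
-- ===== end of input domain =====

-- B replaces A's filter-then-index-lookahead dot removal with one pass carrying a pending_dot flag (same result, simpler decomposition).


-- ===== PORT A =====
-- A's index-based while loop over temp_answer: skip a '.' that is last or not followed by a digit
def pvRemDotsA : List Char → List Char
  | [] => []
  | c :: rest =>
    if c = '.' then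
      match rest with
      | [] => pvRemDotsA rest
      | d :: _ => if PySem.Chars.isdigit d then c :: pvRemDotsA rest else pvRemDotsA rest
    else c :: pvRemDotsA rest

def clean_answer_for_number_comparison (label : String) (answer : Option String) : Option String :=
  match answer with
  | none => none
  | some ans =>
    if PySem.Chars.strIsdigit (PySem.Chars.replace label.toList ['.'] []) then
      if PySem.Chars.isIn [':'] ans.toList then some ans
      else
        let temp := ans.toList.filter (fun c => PySem.Chars.isdigit c || c == '.')
        let result := pvRemDotsA temp
        some (String.ofList (PySem.Chars.strip result))
    else some ans

-- ===== PORT B =====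
-- B's single-pass step: state = (result so far, pending_dot)
def pvStepB (st : List Char × Bool) (c : Char) : List Char × Bool :=
  if PySem.Chars.isdigit c then
    ((if st.2 then st.1 ++ ['.'] else st.1) ++ [c], false)
  else if c = '.' then (st.1, true)
  else st

def clean_answer_for_number_comparison_alt (label : String) (answer : Option String) : Option String :=
  match answer with
  | none => none
  | some ans =>
    if PySem.Chars.strIsdigit (PySem.Chars.replace label.toList ['.'] []) then
      if PySem.Chars.isIn [':'] ans.toList then some ans
      else
        let st := ans.toList.foldl pvStepB ([], false)
        some (String.ofList (PySem.Chars.strip st.1))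
    else some ans

-- ===== PRECONDITION & SPEC =====
def Spec_clean_answer_for_number_comparison (label : String) (answer : Option String) (out : Option String) : Prop := out = clean_answer_for_number_comparison_alt label answer
instance (label : String) (answer : Option String) (out : Option String) : Decidable (Spec_clean_answer_for_number_comparison label answer out) := by unfold Spec_clean_answer_for_number_comparison; infer_instance

-- ===== CLAIM (what is proved, stated in full; the proofs are below) =====
def Claim_equal_clean_answer_for_number_comparison : Prop := ∀ (label : String) (answer : Option String), Dom_clean_answer_for_number_comparison label answer → Spec_clean_answer_for_number_comparison label answer (clean_answer_for_number_comparison label answer)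

-- ===== LEMMAS AND PROOFS =====

theorem pv_isdigit_dot : PySem.Chars.isdigit '.' = false := by decide

-- loop invariant: B's fold equals res ++ A's dot-removal of (pending dot, then the filtered tail)
theorem pv_fold_eq (cs : List Char) : ∀ (res : List Char) (pend : Bool),
    (cs.foldl pvStepB (res, pend)).1 =
      res ++ pvRemDotsA ((if pend then ['.'] else []) ++
        cs.filter (fun c => PySem.Chars.isdigit c || c == '.')) := by
  induction cs with
  | nil =>
    intro res pend
    cases pend <;> simp [pvRemDotsA]
  | cons c cs ih =>
    intro res pend
    by_cases hd : PySem.Chars.isdigit c = true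
    · have hne : c ≠ '.' := by intro h; rw [h, pv_isdigit_dot] at hd; exact absurd hd (by simp)
      simp only [List.foldl_cons, pvStepB, hd, if_true, List.filter_cons,
        Bool.or_eq_true, beq_iff_eq]
      rw [ih]
      cases pend <;> simp [pvRemDotsA, hd, hne]
    · by_cases hdot : c = '.'
      · subst hdot
        simp only [List.foldl_cons, pvStepB, hd, List.filter_cons]
        rw [ih]
        cases pend <;> simp [pvRemDotsA, hd]
      · simp only [List.foldl_cons, pvStepB, hd, if_neg hdot, List.filter_cons]
        rw [ih]
        simp [hdot]

-- ===== VERDICT (by name: the statement is the Claim_ definition above) =====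
theorem clean_answer_for_number_comparison_spec : Claim_equal_clean_answer_for_number_comparison := by
  intro label answer _
  unfold Spec_clean_answer_for_number_comparison
  cases answer with
  | none => rfl
  | some ans =>
    simp only [clean_answer_for_number_comparison, clean_answer_for_number_comparison_alt]
    split_ifs with h1 h2
    · rfl
    · have := pv_fold_eq ans.toList [] false
      simp only [if_neg Bool.false_ne_true, List.nil_append] at this
      rw [this]
    · rfl
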